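-- pv_equiv track=rewrite | github.com/MrBrantCode/unitest_baseline | mut_generate/mist_train_cf/cf_84692/solution.py | find_characters
-- ===== SOURCE A (Python) =====
-- def find_characters(word, characters):
--     # Build a letter frequency count for the entire word
--     word_count = {}
--     for char in word:
--         if char in word_count:
--             word_count[char] += 1
--         else:
--             word_count[char] = 1
--
--     # Extract counts for the characters of interest
--     count = {}
--     for char in characters:
--         if char in word_count:
--             count[char] = word_count[char]
--
--     return count
-- ===== SOURCE B (Python) =====
-- def find_characters(word, characters):
--     # Sort the word once and count each maximal run of equal characters
--     # (sort-then-scan instead of hash counting), then keep the requested ones.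
--     ordered = sorted(word)
--     counts = {}
--     i, n = 0, len(ordered)
--     while i < n:
--         j = i
--         while j < n and ordered[j] == ordered[i]:
--             j += 1
--         counts[ordered[i]] = j - i
--         i = j
--     return {ch: counts[ch] for ch in characters if ch in counts}
-- ===== Notes on version B (the rewrite author's own statement) =====
-- stated objective: alternative
-- what changed: B replaces A's hash-style frequency dict with sort-then-scan: it sorts the word once and run-length-counts maximal runs of equal characters, then extracts the requested characters by comprehension.
import Mathlib
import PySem

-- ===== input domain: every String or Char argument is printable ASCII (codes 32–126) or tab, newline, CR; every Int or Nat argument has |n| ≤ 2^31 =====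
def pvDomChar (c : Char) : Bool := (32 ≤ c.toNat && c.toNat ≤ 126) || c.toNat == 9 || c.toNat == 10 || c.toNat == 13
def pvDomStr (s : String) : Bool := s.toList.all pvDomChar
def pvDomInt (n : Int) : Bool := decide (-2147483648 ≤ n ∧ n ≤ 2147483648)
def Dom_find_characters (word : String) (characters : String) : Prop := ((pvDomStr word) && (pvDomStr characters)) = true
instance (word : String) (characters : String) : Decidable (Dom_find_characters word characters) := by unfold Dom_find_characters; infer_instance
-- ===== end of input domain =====

-- B replaces A's hash-style frequency dict by sort-then-scan run-length counting (alternative algorithm, same results).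

-- ===== PORT A =====
def find_characters (word : String) (characters : String) : List (String × Int) :=
  -- word_count = {}; for char in word: if char in word_count: +=1 else: =1
  let word_count : PySem.Dict Char Int :=
    word.toList.foldl
      (fun d c => if d.contains c then d.insert c (d.getD c 0 + 1) else d.insert c 1)
      PySem.Dict.empty
  -- count = {}; for char in characters: if char in word_count: count[char] = word_count[char]
  let count : PySem.Dict String Int :=
    characters.toList.foldl
      (fun d c => if word_count.contains c then d.insert (String.ofList [c]) (word_count.getD c 0) else d)
      PySem.Dict.empty
  count.items

-- ===== PORT B =====
-- The nested while loop over indices i..j of the sorted list: each outer step consumes one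
-- maximal run `ordered[i:j]` of characters equal to ordered[i] (the run is the leading
-- takeWhile block, the rest is the dropWhile suffix) and records its length j - i.
def pvRuns : List Char → PySem.Dict Char Int → PySem.Dict Char Int
  | [], d => d
  | c :: rest, d =>
      pvRuns (rest.dropWhile (· == c)) (d.insert c (1 + ((rest.takeWhile (· == c)).length : Int)))
  termination_by l _ => l.length
  decreasing_by
    simpa using Nat.lt_succ_of_le (List.length_dropWhile_le (· == c) rest)

def find_characters_alt (word : String) (characters : String) : List (String × Int) :=
  -- ordered = sorted(word); run-length count; {ch: counts[ch] for ch in characters if ch in counts}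
  let ordered : List Char := PySem.List.sorted word.toList (fun x => x) false
  let counts : PySem.Dict Char Int := pvRuns ordered PySem.Dict.empty
  -- counts[ch] is guarded by `ch in counts`, so getD 0 is the exact lookup
  (characters.toList.foldl
      (fun d c => if counts.contains c then d.insert (String.ofList [c]) (counts.getD c 0) else d)
      PySem.Dict.empty).items

-- ===== PRECONDITION & SPEC =====
def Spec_find_characters (word : String) (characters : String) (out : List (String × Int)) : Prop := out = find_characters_alt word characters
instance (word : String) (characters : String) (out : List (String × Int)) : Decidable (Spec_find_characters word characters out) := by unfold Spec_find_characters; infer_instance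

-- ===== CLAIM (what is proved, stated in full; the proofs are below) =====
def Claim_equal_find_characters : Prop := ∀ (word : String) (characters : String), Dom_find_characters word characters → Spec_find_characters word characters (find_characters word characters)

-- ===== LEMMAS AND PROOFS =====

-- A's first loop's step is insert-getD-plus-one, so the table it builds is PySem.Dict.counter.
theorem pv_stepA_eq :
    (fun (d : PySem.Dict Char Int) c => if d.contains c then d.insert c (d.getD c 0 + 1) else d.insert c 1)
      = (fun (d : PySem.Dict Char Int) c => d.insert c (d.getD c 0 + 1)) := by
  funext d c
  by_cases h : d.contains c
  · simp [h]
  · simp only [Bool.not_eq_true] at h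
    rw [PySem.Dict.getD_of_not_contains d 0 h]
    simp [h]

-- On a sorted list, the run-length scan's dict answers every lookup with the total count.
theorem pv_runs_get? (L : List Char) (hs : L.Pairwise (· ≤ ·)) (d : PySem.Dict Char Int) (c : Char) :
    (pvRuns L d).get? c = if c ∈ L then some ((L.count c : Nat) : Int) else d.get? c := by
  induction L, d using pvRuns.induct with
  | case1 => simp [pvRuns]
  | case2 c0 rest d' ih =>
    have hrest : rest.Pairwise (· ≤ ·) := (List.pairwise_cons.mp hs).2
    have hle : ∀ x ∈ rest, c0 ≤ x := (List.pairwise_cons.mp hs).1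
    have hsplit : rest = rest.takeWhile (· == c0) ++ rest.dropWhile (· == c0) :=
      (List.takeWhile_append_dropWhile).symm
    have hdropSub : (rest.dropWhile (· == c0)).Sublist rest := List.dropWhile_sublist _
    have hdrop_sorted : (rest.dropWhile (· == c0)).Pairwise (· ≤ ·) := hrest.sublist hdropSub
    -- c0 does not occur in the dropWhile suffix
    have hc0not : c0 ∉ rest.dropWhile (· == c0) := by
      cases hd : rest.dropWhile (· == c0) with
      | nil => simp
      | cons h t =>
        have hne0 : rest.dropWhile (· == c0) ≠ [] := by simp [hd]
        have hh' := List.head_dropWhile_not (· == c0) hne0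
        have hhd : (rest.dropWhile (· == c0)).head hne0 = h := by simp [hd]
        rw [hhd] at hh'
        have hhne : h ≠ c0 := by simpa using hh'
        have hhmem : h ∈ rest := hdropSub.mem (by simp [hd])
        have hc0h : c0 ≤ h := hle h hhmem
        have hch : c0 < h := lt_of_le_of_ne hc0h (fun he => hhne he.symm)
        intro hmem
        rw [hd] at hdrop_sorted
        rcases List.mem_cons.mp hmem with he | ht
        · exact hhne he.symm
        · have : h ≤ c0 := (List.pairwise_cons.mp hdrop_sorted).1 c0 ht
          exact absurd (lt_of_lt_of_le hch this) (lt_irrefl _)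
    have htake_all : ∀ x ∈ rest.takeWhile (· == c0), x = c0 := by
      intro x hx
      have := List.mem_takeWhile_imp hx
      simpa using this
    -- counts
    have hcount0 : (rest.dropWhile (· == c0)).count c0 = 0 := List.count_eq_zero.mpr hc0not
    have htcount : (rest.takeWhile (· == c0)).count c0 = (rest.takeWhile (· == c0)).length := by
      apply List.count_eq_length.mpr
      intro x hx; simpa using (htake_all x hx).symm
    rw [pvRuns]
    rw [ih hdrop_sorted]
    by_cases hcd : c ∈ rest.dropWhile (· == c0)
    · have hcne : c ≠ c0 := fun he => hc0not (he ▸ hcd)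
      have hcmem : c ∈ c0 :: rest := List.mem_cons_of_mem _ (hdropSub.mem hcd)
      rw [if_pos hcd, if_pos hcmem]
      have ht0 : (rest.takeWhile (· == c0)).count c = 0 := by
        apply List.count_eq_zero.mpr
        intro hm; exact hcne (htake_all c hm)
      have hcrest : rest.count c = (rest.takeWhile (· == c0)).count c + (rest.dropWhile (· == c0)).count c := by
        conv_lhs => rw [hsplit]
        rw [List.count_append]
      have : (c0 :: rest).count c = (rest.dropWhile (· == c0)).count c := by
        simp only [List.count_cons, hcrest, ht0]
        simp [Ne.symm hcne]
      rw [this]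
    · rw [if_neg hcd]
      by_cases hc0 : c = c0
      · subst hc0
        rw [if_pos (List.mem_cons_self), PySem.Dict.get?_insert_self]
        have hcrest : rest.count c = (rest.takeWhile (· == c)).length := by
          conv_lhs => rw [hsplit]
          rw [List.count_append, htcount, hcount0]
          omega
        have : (c :: rest).count c = 1 + (rest.takeWhile (· == c)).length := by
          simp [hcrest]
          omega
        rw [this]
        push_cast
        ring_nf
      · have hnm : c ∉ c0 :: rest := by
          intro hm
          rcases List.mem_cons.mp hm with he | hr
          · exact hc0 he
          · rw [hsplit] at hr
            rcases List.mem_append.mp hr with ht | hd2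
            · exact hc0 (htake_all c ht)
            · exact hcd hd2
        rw [if_neg hnm, PySem.Dict.get?_insert_of_ne _ _ hc0]

-- Lookup agreement between B's run-length dict and A's counter, on sorted input.
theorem pv_counts_eq_counter (wl : List Char) (c : Char) :
    (pvRuns (PySem.List.sorted wl (fun x => x) false) PySem.Dict.empty).get? c
      = (PySem.Dict.counter wl).get? c := by
  have hperm : (PySem.List.sorted wl (fun x => x) false).Perm wl := PySem.List.sorted_perm _ _ _
  rw [pv_runs_get? _ (PySem.List.sorted_pairwise wl (fun x => x)) PySem.Dict.empty c]
  by_cases hm : c ∈ wl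
  · have hms : c ∈ PySem.List.sorted wl (fun x => x) false := (PySem.List.mem_sorted _ _ _ _).mpr hm
    rw [if_pos hms, hperm.count_eq]
    have hcont : (PySem.Dict.counter wl).contains c = true := by
      rw [PySem.Dict.contains_counter]; simpa using hm
    have : (PySem.Dict.counter wl).get? c = some ((PySem.Dict.counter wl).getD c 0) := by
      rw [PySem.Dict.getD_eq_get?_getD]
      cases hg : (PySem.Dict.counter wl).get? c with
      | none => rw [PySem.Dict.contains_eq_isSome_get?, hg] at hcont; simp at hcont
      | some v => simp
    rw [this, PySem.Dict.getD_counter]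
  · have hms : c ∉ PySem.List.sorted wl (fun x => x) false := fun h => hm ((PySem.List.mem_sorted _ _ _ _).mp h)
    rw [if_neg hms, PySem.Dict.get?_empty]
    have hcont : (PySem.Dict.counter wl).contains c = false := by
      rw [PySem.Dict.contains_counter]; simpa using hm
    cases hg : (PySem.Dict.counter wl).get? c with
    | none => rfl
    | some v => rw [PySem.Dict.contains_eq_isSome_get?, hg] at hcont; simp at hcont

theorem pv_main (word characters : String) :
    find_characters word characters = find_characters_alt word characters := by
  unfold find_characters find_characters_alt
  rw [pv_stepA_eq, PySem.Dict.foldl_insert_getD_add_one_eq_counter]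
  dsimp only
  congr 1
  apply PySem.List.foldl_congr_mem
  intro acc c _
  have hget := pv_counts_eq_counter word.toList c
  have hcont : (pvRuns (PySem.List.sorted word.toList (fun x => x) false) PySem.Dict.empty).contains c
      = (PySem.Dict.counter word.toList).contains c := by
    rw [PySem.Dict.contains_eq_isSome_get?, PySem.Dict.contains_eq_isSome_get?, hget]
  have hgetD : (pvRuns (PySem.List.sorted word.toList (fun x => x) false) PySem.Dict.empty).getD c 0
      = (PySem.Dict.counter word.toList).getD c 0 := by
    rw [PySem.Dict.getD_eq_get?_getD, PySem.Dict.getD_eq_get?_getD, hget]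
  rw [hcont, hgetD]

-- ===== VERDICT (by name: the statement is the Claim_ definition above) =====
theorem find_characters_spec : Claim_equal_find_characters := by
  intro word characters _
  unfold Spec_find_characters
  exact pv_main word characters
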